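-- pv_equiv track=rewrite | github.com/Pydare/Algorithm-Problems | companies/roblox questions/smart_scale.py | delete_products
-- ===== SOURCE A (Python) =====
-- from collections import defaultdict
--
-- def delete_products(ids,m):
--     hash_map = defaultdict(int)
--
--     for i in ids:
--         hash_map[i] += 1
--
--     while m > 0:
--         min_key = min(hash_map, key=hash_map.get)
--         hash_map[min_key] -= 1
--         m -= 1
--         if hash_map[min_key] == 0:
--             del hash_map[min_key]
--
--     return len(hash_map)
-- ===== SOURCE B (Python) =====
-- from collections import Counter
--
-- def delete_products(ids, m):
--     counts = sorted(Counter(ids).values())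
--     k = len(counts)
--     for c in counts:
--         if m >= c:
--             m -= c
--             k -= 1
--         else:
--             break
--     return k
-- ===== Notes on version B (the rewrite author's own statement) =====
-- stated objective: faster
-- what changed: Replaced the m-iteration loop that rescans the whole dict with min() each step by sorting the counts once and consuming whole least-frequent groups while the budget lasts.
-- crash fix: When m exceeds len(ids), A raises ValueError (min of an empty dict) while B returns 0. — e.g. on delete_products([1], 2): A raises ValueError, B returns 0
import Mathlib
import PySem

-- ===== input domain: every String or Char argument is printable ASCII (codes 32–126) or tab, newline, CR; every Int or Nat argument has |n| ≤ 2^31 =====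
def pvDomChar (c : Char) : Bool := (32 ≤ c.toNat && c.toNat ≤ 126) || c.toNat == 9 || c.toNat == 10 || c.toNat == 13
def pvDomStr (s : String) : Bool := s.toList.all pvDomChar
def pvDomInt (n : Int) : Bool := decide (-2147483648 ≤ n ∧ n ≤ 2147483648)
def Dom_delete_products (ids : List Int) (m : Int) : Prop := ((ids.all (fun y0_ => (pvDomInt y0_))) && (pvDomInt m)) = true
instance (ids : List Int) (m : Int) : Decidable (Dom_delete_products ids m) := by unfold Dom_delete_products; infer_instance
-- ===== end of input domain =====

-- B replaces A's m-step loop (a full min() scan over the dict per deleted item) by sorting the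
-- counts once and consuming whole least-frequent groups while the budget lasts.

-- ===== PORT A =====
-- the 'while m > 0' loop; Python runs it exactly m times when m > 0, so fuel m.toNat is exact.
-- min(hash_map, key=hash_map.get) = first key with minimal count; on an empty dict Python raises
-- ValueError (min? = none) — those inputs are excluded by Pre_ and the port just stops there.
def pvALoop : Nat → PySem.Dict Int Int → PySem.Dict Int Int
  | 0, d => d
  | n + 1, d =>
    match PySem.List.min? d.keys (fun k => d.getD k 0) with
    | none => d
    | some minKey =>
      let d' := d.modify minKey 0 (· - 1)       -- hash_map[min_key] -= 1
      if d'.getD minKey 0 = 0 then pvALoop n (d'.erase minKey) else pvALoop n d'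

def delete_products (ids : List Int) (m : Int) : Int :=
  let hashMap : PySem.Dict Int Int := ids.foldl (fun d i => d.modify i 0 (· + 1)) PySem.Dict.empty
  ((pvALoop m.toNat hashMap).size : Int)

-- ===== PORT B =====
-- the 'for c in counts' loop with the break; k is the running survivor count
def pvBLoop : List Int → Int → Int → Int
  | [], _, k => k
  | c :: rest, m, k => if m ≥ c then pvBLoop rest (m - c) (k - 1) else k

def delete_products_alt (ids : List Int) (m : Int) : Int :=
  let counts := PySem.List.sorted (PySem.Dict.counter ids).values (fun x => x) false
  pvBLoop counts m (counts.length : Int)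

-- ===== PRECONDITION & SPEC =====
-- Pre_ excludes exactly the inputs where A raises: when m > len(ids) the dict runs empty and
-- min() of an empty sequence raises ValueError.
def Pre_delete_products (ids : List Int) (m : Int) : Prop := m ≤ (ids.length : Int)
instance (ids : List Int) (m : Int) : Decidable (Pre_delete_products ids m) := by unfold Pre_delete_products; infer_instance
def pvWitness_delete_products : List Int × Int := ([1, 2, 2, 3, 3, 3], 3)

-- When m exceeds len(ids), A raises ValueError (min of an empty dict) while B returns 0
-- (made checkable by Claim_raises_delete_products, proved at the bottom).
def Raises_delete_products (ids : List Int) (m : Int) : Prop := (ids.length : Int) < m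
instance (ids : List Int) (m : Int) : Decidable (Raises_delete_products ids m) := by unfold Raises_delete_products; infer_instance
def pvRaiseWitness_delete_products : List Int × Int := ([1], 2)
def pvRaiseWitnessOut_delete_products : Int := 0

def Spec_delete_products (ids : List Int) (m : Int) (out : Int) : Prop := out = delete_products_alt ids m
instance (ids : List Int) (m : Int) (out : Int) : Decidable (Spec_delete_products ids m out) := by unfold Spec_delete_products; infer_instance

-- ===== CLAIM (what is proved, stated in full; the proofs are below) =====
def Claim_equal_delete_products : Prop := ∀ (ids : List Int) (m : Int), Dom_delete_products ids m → Pre_delete_products ids m → Spec_delete_products ids m (delete_products ids m)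
def Claim_raises_delete_products : Prop := (∀ (ids : List Int) (m : Int), Dom_delete_products ids m → Raises_delete_products ids m → ¬ Pre_delete_products ids m) ∧ (Dom_delete_products (pvRaiseWitness_delete_products.1) (pvRaiseWitness_delete_products.2) ∧ Raises_delete_products (pvRaiseWitness_delete_products.1) (pvRaiseWitness_delete_products.2) ∧ delete_products_alt (pvRaiseWitness_delete_products.1) (pvRaiseWitness_delete_products.2) = pvRaiseWitnessOut_delete_products)

-- ===== LEMMAS AND PROOFS =====

-- the common abstraction: one A-step on the multiset of counts, seen on its sorted form:
-- decrement the minimum, drop it when it reaches 0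
def pvSStep : List Int → List Int
  | [] => []
  | c :: t => if c = 1 then t else (c - 1) :: t

-- abbreviation used throughout: Python's sorted(xs) on ints
def pvSort (xs : List Int) : List Int := PySem.List.sorted xs (fun x => x) false

-- ---- generic list facts ----

lemma pvSort_perm (xs : List Int) : (pvSort xs).Perm xs :=
  PySem.List.sorted_perm xs (fun x => x) false

lemma pvSort_pairwise (xs : List Int) : (pvSort xs).Pairwise (· ≤ ·) :=
  PySem.List.sorted_pairwise xs (fun x => x)

lemma pvSort_eq_of_perm {xs l : List Int} (h : xs.Perm l) (hl : l.Pairwise (· ≤ ·)) :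
    pvSort xs = l := by
  exact PySem.List.eq_of_perm_of_pairwise_le_of_injective (fun x => x) (fun _ _ h => h)
    ((pvSort_perm xs).trans h) (pvSort_pairwise xs) hl

-- ---- dict surgery: splitting d.items at a key ----

lemma pv_items_split {d : PySem.Dict Int Int} {k : Int}
    (hnd : d.keys.Nodup) (hk : k ∈ d.keys) :
    ∃ s t, d.items = s ++ (k, d.getD k 0) :: t ∧
      (∀ p ∈ s, p.1 ≠ k) ∧ (∀ p ∈ t, p.1 ≠ k) := by
  obtain ⟨v, hv⟩ : ∃ v, d.get? k = some v := by
    rcases h : d.get? k with _ | v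
    · exact absurd ((PySem.Dict.get?_eq_none_iff_not_mem_keys d k).mp h) (by simpa using hk)
    · exact ⟨v, rfl⟩
  have hgd : d.getD k 0 = v := PySem.Dict.getD_of_get?_eq_some d 0 hv
  have hmem : (k, v) ∈ d.items := PySem.Dict.mem_items_of_get?_eq_some d hv
  obtain ⟨s, t, hst⟩ := List.append_of_mem hmem
  have hkeys : d.keys = s.map (·.1) ++ k :: t.map (·.1) := by
    simp [PySem.Dict.keys, hst]
  rw [hkeys] at hnd
  have hns : k ∉ s.map (·.1) ∧ k ∉ t.map (·.1) := by
    obtain ⟨-, h2, hdisj⟩ := List.nodup_append.mp hnd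
    exact ⟨fun hks => hdisj k hks k (by simp) rfl, (List.nodup_cons.mp h2).1⟩
  refine ⟨s, t, by rw [hgd]; exact hst, ?_, ?_⟩
  · intro p hp hpk; exact hns.1 (by exact hpk ▸ List.mem_map_of_mem hp)
  · intro p hp hpk; exact hns.2 (by exact hpk ▸ List.mem_map_of_mem hp)

-- values of d, d.insert k w, (d.insert k w).erase k, all in terms of one split
lemma pv_values_perm {d : PySem.Dict Int Int} {k : Int}
    (hnd : d.keys.Nodup) (hk : k ∈ d.keys) :
    d.values.Perm (d.getD k 0 :: ((d.insert k (d.getD k 0 - 1)).erase k).values) ∧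
    (d.insert k (d.getD k 0 - 1)).values.Perm
      ((d.getD k 0 - 1) :: ((d.insert k (d.getD k 0 - 1)).erase k).values) := by
  obtain ⟨s, t, hst, hs, ht⟩ := pv_items_split hnd hk
  set v := d.getD k 0 with hv
  have hcont : d.contains k := (PySem.Dict.contains_iff_mem_keys d k).mpr hk
  have hmap : ∀ (l : List (Int × Int)), (∀ p ∈ l, p.1 ≠ k) →
      l.map (fun p => if (p.1 == k) = true then (k, v - 1) else p) = l := by
    intro l hl
    induction l with
    | nil => rfl
    | cons a r ih =>
      have ha : ¬ (a.1 == k) = true := by simpa using hl a (by simp)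
      rw [List.map_cons, if_neg ha, ih (fun p hp => hl p (by simp [hp]))]
  have hfil : ∀ (l : List (Int × Int)), (∀ p ∈ l, p.1 ≠ k) →
      l.filter (fun p => !(p.1 == k)) = l := fun l hl =>
    List.filter_eq_self.mpr (fun p hp => by simp [hl p hp])
  have hins : (d.insert k (v - 1)).items = s ++ (k, v - 1) :: t := by
    rw [PySem.Dict.items_insert_of_contains d (v-1) hcont, hst]
    simp only [List.map_append, List.map_cons]
    rw [hmap s hs, hmap t ht]
    simp
  have hera : ((d.insert k (v - 1)).erase k).items = s ++ t := by
    simp only [PySem.Dict.erase, hins, List.filter_append, List.filter_cons]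
    rw [hfil s hs, hfil t ht]
    simp
  constructor
  · show (d.items.map (·.2)).Perm (v :: ((d.insert k (v - 1)).erase k).items.map (·.2))
    rw [hst, hera]
    simp only [List.map_append, List.map_cons]; exact List.perm_middle
  · show ((d.insert k (v - 1)).items.map (·.2)).Perm
      ((v - 1) :: ((d.insert k (v - 1)).erase k).items.map (·.2))
    rw [hins, hera]
    simp only [List.map_append, List.map_cons]; exact List.perm_middle

lemma pv_nodup_erase (d : PySem.Dict Int Int) (k : Int) (hnd : d.keys.Nodup) :
    (d.erase k).keys.Nodup := by
  have hsub : ((d.erase k).items.map (fun p => p.1)).Sublist (d.items.map (fun p => p.1)) :=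
    List.Sublist.map _ List.filter_sublist
  simp only [PySem.Dict.keys] at *
  exact hnd.sublist hsub

-- ---- A-side main invariant ----

lemma pvALoop_size (n : Nat) (d : PySem.Dict Int Int)
    (hnd : d.keys.Nodup) (hpos : ∀ v ∈ d.values, 0 < v) (hsum : (n : Int) ≤ d.values.sum) :
    ((pvALoop n d).size : Int) = ((pvSStep^[n] (pvSort d.values)).length : Int) := by
  induction n generalizing d with
  | zero =>
    have hlen := (pvSort_perm d.values).length_eq
    simp only [pvALoop, Function.iterate_zero, id_eq]
    simp only [PySem.Dict.size, PySem.Dict.values, List.length_map] at hlen ⊢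
    omega
  | succ n ih =>
    have hvne : d.values ≠ [] := by
      intro h
      rw [h] at hsum
      simp at hsum
      omega
    have hkne : d.keys ≠ [] := by
      intro h
      apply hvne
      simp only [PySem.Dict.keys, List.map_eq_nil_iff] at h
      simp [PySem.Dict.values, h]
    rcases hmk : PySem.List.min? d.keys (fun j => d.getD j 0) with _ | k
    · exact absurd ((PySem.List.min?_eq_none_iff _ _).mp hmk) hkne
    have hk : k ∈ d.keys := PySem.List.min?_mem hmk
    have hmin : ∀ j ∈ d.keys, d.getD k 0 ≤ d.getD j 0 := PySem.List.min?_isMin hmk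
    obtain ⟨P1, P2⟩ := pv_values_perm hnd hk
    set v := d.getD k 0 with hvdef
    set rv := ((d.insert k (v - 1)).erase k).values with hrvdef
    have hvpos : 0 < v := hpos v (P1.symm.subset (by simp))
    have hminv : ∀ w ∈ d.values, v ≤ w := by
      intro w hw
      rw [PySem.Dict.values_eq_map_keys d hnd 0] at hw
      obtain ⟨j, hj, rfl⟩ := List.mem_map.mp hw
      exact hmin j hj
    have hrvmem : ∀ w ∈ rv, w ∈ d.values := fun w hw => P1.symm.subset (by simp [hw])
    have hrvpos : ∀ w ∈ rv, 0 < w := fun w hw => hpos w (hrvmem w hw)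
    set t0 := pvSort rv with ht0
    have hs0 : pvSort d.values = v :: t0 := by
      apply pvSort_eq_of_perm (P1.trans ((pvSort_perm rv).symm.cons v))
      rw [List.pairwise_cons]
      exact ⟨fun w hw => hminv w (hrvmem w ((pvSort_perm rv).subset hw)), pvSort_pairwise rv⟩
    have hsum1 : d.values.sum = v + rv.sum := by rw [P1.sum_eq]; simp
    have hmod : d.modify k 0 (· - 1) = d.insert k (v - 1) := rfl
    have hgetD : (d.insert k (v - 1)).getD k 0 = v - 1 :=
      PySem.Dict.getD_insert_self d k (v - 1) 0
    simp only [pvALoop, hmk, hmod, hgetD]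
    rw [hs0, Function.iterate_succ_apply]
    by_cases hv1 : v = 1
    · rw [if_pos (by omega)]
      have hnd' := pv_nodup_erase (d.insert k (v - 1)) k
        (PySem.Dict.nodup_keys_insert d k (v - 1) hnd)
      rw [ih _ hnd' hrvpos (by rw [← hrvdef]; omega)]
      simp only [pvSStep, if_pos hv1, ← hrvdef, ← ht0]
    · rw [if_neg (by omega)]
      have hnd' := PySem.Dict.nodup_keys_insert d k (v - 1) hnd
      have hpos' : ∀ w ∈ (d.insert k (v - 1)).values, 0 < w := by
        intro w hw
        rcases List.mem_cons.mp (P2.subset hw) with h | h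
        · subst h; omega
        · exact hrvpos w h
      have hsum' : (n : Int) ≤ (d.insert k (v - 1)).values.sum := by
        rw [P2.sum_eq]
        simp only [List.sum_cons]
        omega
      rw [ih _ hnd' hpos' hsum']
      have hs1 : pvSort (d.insert k (v - 1)).values = (v - 1) :: t0 := by
        apply pvSort_eq_of_perm (P2.trans ((pvSort_perm rv).symm.cons (v - 1)))
        rw [List.pairwise_cons]
        refine ⟨fun w hw => ?_, pvSort_pairwise rv⟩
        have := hminv w (hrvmem w ((pvSort_perm rv).subset hw))
        omega
      rw [hs1]
      simp only [pvSStep, if_neg hv1]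

-- ---- B-side main invariant ----

lemma pvSStep_iter_lt (j : Nat) (c : Int) (t : List Int) (h : (j : Int) < c) :
    pvSStep^[j] (c :: t) = (c - j) :: t := by
  induction j generalizing c t with
  | zero => simp
  | succ i ih =>
    rw [Function.iterate_succ_apply]
    have hc : ¬ c = 1 := by omega
    simp only [pvSStep, if_neg hc]
    rw [ih (c - 1) t (by omega)]
    congr 1
    push_cast
    ring

lemma pvSStep_iter_nil (j : Nat) : pvSStep^[j] [] = [] := by
  induction j with
  | zero => rfl
  | succ i ih => rw [Function.iterate_succ_apply]; exact ih

lemma pvBLoop_eq (s : List Int) (m k : Int)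
    (hpos : ∀ c ∈ s, 0 < c) (hsum : m ≤ s.sum) :
    pvBLoop s m k = k - (s.length : Int) + ((pvSStep^[m.toNat] s).length : Int) := by
  induction s generalizing m k with
  | nil => simp [pvBLoop, pvSStep_iter_nil]
  | cons c t ih =>
    have hc : 0 < c := hpos c (by simp)
    by_cases hm : m ≥ c
    · simp only [pvBLoop, if_pos hm]
      have hsplit : m.toNat = (m - c).toNat + c.toNat := by omega
      rw [ih (m - c) (k - 1) (fun x hx => hpos x (by simp [hx]))
            (by simp at hsum; omega), hsplit, Function.iterate_add_apply]
      have hstep : pvSStep^[c.toNat] (c :: t) = t := by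
        have h1 : c.toNat = (c.toNat - 1) + 1 := by omega
        rw [h1, Function.iterate_succ_apply' ]
        rw [pvSStep_iter_lt (c.toNat - 1) c t (by omega)]
        have : c - ((c.toNat - 1 : Nat) : Int) = 1 := by omega
        simp [this, pvSStep]
      rw [hstep]
      simp
      ring
    · simp only [pvBLoop, if_neg hm]
      by_cases h0 : m ≤ 0
      · have : m.toNat = 0 := by omega
        simp [this]
      · rw [pvSStep_iter_lt m.toNat c t (by omega)]
        simp

-- ---- counter facts ----

lemma pv_counter_values_pos (ids : List Int) :
    ∀ v ∈ (PySem.Dict.counter ids).values, 0 < v := by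
  intro v hv
  simp only [PySem.Dict.values, PySem.Dict.items_counter, List.map_map, List.mem_map] at hv
  obtain ⟨x, hx, rfl⟩ := hv
  have : x ∈ ids := (PySem.Set.mem_ofList ids x).mp hx
  simp only [Function.comp]
  exact_mod_cast List.count_pos_iff.mpr this

lemma pv_counter_values_sum (ids : List Int) :
    (PySem.Dict.counter ids).values.sum = (ids.length : Int) := by
  have hperm : (PySem.Set.ofList ids).Perm ids.dedup := by
    rw [List.perm_ext_iff_of_nodup (PySem.Set.nodup_ofList ids) ids.nodup_dedup]
    intro a
    rw [PySem.Set.mem_ofList, List.mem_dedup]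
  simp only [PySem.Dict.values, PySem.Dict.items_counter, List.map_map, Function.comp_def]
  have := hperm.map (fun k => ((ids.count k : Int)))
  rw [this.sum_eq, ← List.sum_map_count_dedup_eq_length ids, Nat.cast_list_sum]
  simp [List.map_map, Function.comp_def]

-- ===== VERDICT (by name: the statement is the Claim_ definition above) =====
theorem delete_products_spec : Claim_equal_delete_products := by
  intro ids m _ hpre
  unfold Pre_delete_products at hpre
  show delete_products ids m = delete_products_alt ids m
  unfold delete_products delete_products_alt
  have hfold : ids.foldl (fun d i => d.modify i 0 (· + 1)) PySem.Dict.empty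
      = PySem.Dict.counter ids := rfl
  rw [hfold]
  have hnd := PySem.Dict.nodup_keys_counter ids
  have hpos := pv_counter_values_pos ids
  have hsumv := pv_counter_values_sum ids
  have hperm := pvSort_perm (PySem.Dict.counter ids).values
  have hA := pvALoop_size m.toNat (PySem.Dict.counter ids) hnd hpos (by rw [hsumv]; omega)
  have hB := pvBLoop_eq (pvSort (PySem.Dict.counter ids).values) m
      ((pvSort (PySem.Dict.counter ids).values).length : Int)
      (fun c hc => hpos c (hperm.subset hc))
      (by rw [hperm.sum_eq, hsumv]; omega)
  show ((pvALoop m.toNat (PySem.Dict.counter ids)).size : Int)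
      = pvBLoop (pvSort (PySem.Dict.counter ids).values) m
          ((pvSort (PySem.Dict.counter ids).values).length : Int)
  rw [hA, hB]
  omega

@[simp]
theorem delete_products_raises : Claim_raises_delete_products := by
  unfold Claim_raises_delete_products
  refine ⟨?_, by decide⟩
  intro ids m _ hr hp
  exact absurd hp (by unfold Pre_delete_products Raises_delete_products at *; omega)
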